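-- pv_equiv track=rewrite | github.com/rsftb/Portfolio | Python/list_del_even_occurrences.py | count_occurrences
-- ===== SOURCE A (Python) =====
-- def count_occurrences(lst):
--     "Counts the amount of time each number appears in the list"
--     dictionary = {}
--     for i in range(len(lst)):
--         if lst[i] in dictionary:
--             dictionary[lst[i]] += 1
--         else:
--             dictionary[lst[i]] = 1
--     return dictionary
-- ===== SOURCE B (Python) =====
-- def count_occurrences(lst):
--     "Counts the amount of time each number appears in the list"
--     return {x: lst.count(x) for x in dict.fromkeys(lst)}
-- ===== Notes on version B (the rewrite author's own statement) =====
-- stated objective: idiomatic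
-- what changed: Replaced the index loop with a running dict accumulator by a dict comprehension over the first-occurrence distinct keys (dict.fromkeys) that rescans the list with lst.count(x) for each key.
import Mathlib
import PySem

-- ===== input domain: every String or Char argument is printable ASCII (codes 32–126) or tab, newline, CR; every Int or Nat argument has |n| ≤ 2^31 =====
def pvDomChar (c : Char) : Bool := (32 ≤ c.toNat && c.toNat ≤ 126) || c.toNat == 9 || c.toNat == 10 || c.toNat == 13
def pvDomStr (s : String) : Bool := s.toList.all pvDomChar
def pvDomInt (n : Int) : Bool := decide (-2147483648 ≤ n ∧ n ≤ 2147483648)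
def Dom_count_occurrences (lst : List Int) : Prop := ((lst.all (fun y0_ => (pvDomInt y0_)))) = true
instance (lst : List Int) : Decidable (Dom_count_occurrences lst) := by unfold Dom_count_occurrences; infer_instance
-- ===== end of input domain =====

-- B replaces the index loop with a running dict accumulator by a dict comprehension
-- over the first-occurrence distinct keys, counting each with lst.count (idiomatic, not faster).


-- ===== PORT A =====
-- for i in range(len(lst)): if lst[i] in dictionary: dictionary[lst[i]] += 1 else: dictionary[lst[i]] = 1
def count_occurrences (lst : List Int) : List (Int × Int) :=
  ((PySem.List.pyRange 0 (PySem.List.len lst) 1).foldl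
    (fun (d : PySem.Dict Int Int) i =>
      if d.contains (PySem.List.pyGetD lst i 0) then
        d.insert (PySem.List.pyGetD lst i 0) (d.getD (PySem.List.pyGetD lst i 0) 0 + 1)
      else d.insert (PySem.List.pyGetD lst i 0) 1)
    PySem.Dict.empty).items

-- ===== PORT B =====
-- {x: lst.count(x) for x in dict.fromkeys(lst)}
def count_occurrences_alt (lst : List Int) : List (Int × Int) :=
  (PySem.List.dedup lst).map (fun x => (x, (lst.count x : Int)))

-- ===== PRECONDITION & SPEC =====
def Spec_count_occurrences (lst : List Int) (out : List (Int × Int)) : Prop := out = count_occurrences_alt lst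
instance (lst : List Int) (out : List (Int × Int)) : Decidable (Spec_count_occurrences lst out) := by unfold Spec_count_occurrences; infer_instance

-- ===== CLAIM (what is proved, stated in full; the proofs are below) =====
def Claim_equal_count_occurrences : Prop := ∀ (lst : List Int), Dom_count_occurrences lst → Spec_count_occurrences lst (count_occurrences lst)

-- ===== LEMMAS AND PROOFS =====

-- A's loop body, on a key already present or fresh, is the same step as the counter fold.
lemma count_occurrences_eq_counter_items (lst : List Int) :
    count_occurrences lst = (PySem.Dict.counter lst).items := by
  unfold count_occurrences
  rw [PySem.List.foldl_pyRange_zero_pyGetD lst 0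
      (fun (d : PySem.Dict Int Int) x =>
        if d.contains x then d.insert x (d.getD x 0 + 1) else d.insert x 1)]
  rw [PySem.List.foldl_congr_mem lst
      (fun (d : PySem.Dict Int Int) x =>
        if d.contains x then d.insert x (d.getD x 0 + 1) else d.insert x 1)
      (fun (d : PySem.Dict Int Int) x => d.insert x (d.getD x 0 + 1))
      PySem.Dict.empty
      (by
        intro d x _
        by_cases h : d.contains x
        · simp [h]
        · simp [h, PySem.Dict.getD_of_not_contains _ _ (by simpa using h)])]
  rw [PySem.Dict.foldl_insert_getD_add_one_eq_counter]

-- ===== VERDICT (by name: the statement is the Claim_ definition above) =====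
theorem count_occurrences_spec : Claim_equal_count_occurrences := by
  intro lst _
  unfold Spec_count_occurrences count_occurrences_alt
  rw [count_occurrences_eq_counter_items, PySem.Dict.items_counter]
  simp [PySem.List.dedup_eq_ofList]
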